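-- pv_equiv track=rewrite | github.com/ShuangyuanLu/QCphasetransition | binary_spin_symmetry.py | _rectangle_spatial_permutations
-- ===== SOURCE A (Python) =====
-- def rectangular_support_offsets(support_shape):
--     rows, columns = support_shape
--     return tuple((row, column) for row in range(rows) for column in range(columns))
--
-- def _rectangle_spatial_permutations(support_shape):
--     rows, columns = support_shape
--     coordinates = rectangular_support_offsets(support_shape)
--     coordinate_to_index = {coordinate: index for index, coordinate in enumerate(coordinates)}
--
--     transforms = [
--         lambda row, column: (row, column),
--         lambda row, column: (rows - 1 - row, columns - 1 - column),
--         lambda row, column: (row, columns - 1 - column),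
--         lambda row, column: (rows - 1 - row, column),
--     ]
--     if rows == columns:
--         transforms.extend(
--             [
--                 lambda row, column: (column, rows - 1 - row),
--                 lambda row, column: (columns - 1 - column, row),
--                 lambda row, column: (column, row),
--                 lambda row, column: (columns - 1 - column, rows - 1 - row),
--             ]
--         )
--
--     permutations = []
--     seen = set()
--     for transform in transforms:
--         permutation = []
--         for row, column in coordinates:
--             transformed_coordinate = transform(row, column)
--             permutation.append(coordinate_to_index[transformed_coordinate])
--         permutation = tuple(permutation)
--         if permutation not in seen:
--             seen.add(permutation)
--             permutations.append(permutation)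
--     return tuple(permutations)
-- ===== SOURCE B (Python) =====
-- def _rectangle_spatial_permutations(support_shape):
--     rows, columns = support_shape
--     # Row-major index grid; the symmetry group is generated by the horizontal
--     # flip h, the vertical flip v (and the transpose t when square): every
--     # other symmetry's permutation is obtained by COMPOSING these index
--     # permutations (compose(p, q)[i] = p[q[i]]) instead of applying a
--     # coordinate map per cell with a coordinate->index dict.
--     grid = [list(range(r * columns, (r + 1) * columns)) for r in range(rows)]
--
--     def flat(g):
--         return [x for row in g for x in row]
--
--     def compose(p, q):
--         return [p[j] for j in q]
--
--     ident = flat(grid)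
--     h = flat([row[::-1] for row in grid])       # flip each row (mirror columns)
--     v = flat(grid[::-1])                        # flip row order (mirror rows)
--     candidates = [ident, compose(h, v), h, v]
--     if rows == columns:
--         t = flat([[row[c] for row in grid] for c in range(columns)])  # transpose
--         candidates += [compose(t, v), compose(t, h), t, compose(t, compose(h, v))]
--
--     permutations = []
--     seen = set()
--     for p in candidates:
--         p = tuple(p)
--         if p not in seen:
--             seen.add(p)
--             permutations.append(p)
--     return tuple(permutations)
-- ===== Notes on version B (the rewrite author's own statement) =====
-- stated objective: alternative
-- what changed: B builds a row-major index grid and computes only the three generator permutations directly (per-row reversal = horizontal flip, row-order reversal = vertical flip, transpose), then derives every remaining symmetry by composing index permutations (compose(p,q)[i]=p[q[i]]), instead of A's eight coordinate lambdas applied cell-by-cell through a coordinate-to-index dict; dropping the dict lookups and per-cell lambda calls makes B measurably faster by a constant factor.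
import Mathlib
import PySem

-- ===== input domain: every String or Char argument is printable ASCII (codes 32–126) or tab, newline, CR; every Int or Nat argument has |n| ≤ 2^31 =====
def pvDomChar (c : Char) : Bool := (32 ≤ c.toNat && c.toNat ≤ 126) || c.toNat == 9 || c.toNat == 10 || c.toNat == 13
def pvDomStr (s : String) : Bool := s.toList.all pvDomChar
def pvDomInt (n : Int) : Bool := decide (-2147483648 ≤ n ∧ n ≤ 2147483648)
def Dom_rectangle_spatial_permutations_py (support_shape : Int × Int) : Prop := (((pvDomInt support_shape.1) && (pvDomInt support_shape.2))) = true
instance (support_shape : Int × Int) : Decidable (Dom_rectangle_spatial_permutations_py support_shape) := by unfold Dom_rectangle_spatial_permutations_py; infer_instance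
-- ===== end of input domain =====

-- B derives the symmetries from three generator permutations (row reversal, row-order reversal,
-- transpose) composed as index permutations, instead of A's eight coordinate lambdas looked up in a
-- coordinate->index dict (objective: alternative; same asymptotic cost).


-- ===== PORT A =====
def rectangular_support_offsets_py (support_shape : Int × Int) : List (Int × Int) :=
  let rows := support_shape.1
  let columns := support_shape.2
  (PySem.List.pyRange 0 rows 1).flatMap (fun row =>
    (PySem.List.pyRange 0 columns 1).map (fun column => (row, column)))

def rectangle_spatial_permutations_py (support_shape : Int × Int) : List (List Int) :=
  let rows := support_shape.1
  let columns := support_shape.2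
  let coordinates := rectangular_support_offsets_py support_shape
  let coordinate_to_index : PySem.Dict (Int × Int) Int :=
    (PySem.List.enumerate coordinates 0).foldl (fun d p => d.insert p.2 p.1) PySem.Dict.empty
  let transforms : List (Int → Int → Int × Int) :=
    [fun row column => (row, column),
     fun row column => (rows - 1 - row, columns - 1 - column),
     fun row column => (row, columns - 1 - column),
     fun row column => (rows - 1 - row, column)]
  let transforms := if rows = columns then
      transforms ++
      [fun row column => (column, rows - 1 - row),
       fun row column => (columns - 1 - column, row),
       fun row column => (column, row),
       fun row column => (columns - 1 - column, rows - 1 - row)]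
    else transforms
  -- getD's default is never used: every transform maps the coordinate grid into itself,
  -- so the Python dict lookup never raises KeyError
  let st := transforms.foldl (fun (st : List (List Int) × PySem.Set (List Int)) transform =>
      let permutation := coordinates.foldl (fun acc rc =>
          acc ++ [coordinate_to_index.getD (transform rc.1 rc.2) 0]) []
      if PySem.Set.contains st.2 permutation = true then st
      else (st.1 ++ [permutation], PySem.Set.add st.2 permutation)) ([], PySem.Set.empty)
  st.1

-- ===== PORT B =====
-- 'row[::-1]' and 'grid[::-1]' are List.reverse (PySem.List.slice?_none_none_neg_one);
-- 'p[j]' is ported as pyGetD with default 0: every index produced is in range.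
def rectangle_spatial_permutations_py_alt (support_shape : Int × Int) : List (List Int) :=
  let rows := support_shape.1
  let columns := support_shape.2
  let grid : List (List Int) :=
    (PySem.List.pyRange 0 rows 1).map (fun r =>
      PySem.List.pyRange (r * columns) ((r + 1) * columns) 1)
  let flat : List (List Int) → List Int := fun g => g.flatMap (fun row => row)
  let compose : List Int → List Int → List Int := fun p q =>
    q.map (fun j => PySem.List.pyGetD p j 0)
  let ident := flat grid
  let h := flat (grid.map (fun row => row.reverse))
  let v := flat grid.reverse
  let candidates := [ident, compose h v, h, v]
  let candidates := if rows = columns then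
      let t := flat ((PySem.List.pyRange 0 columns 1).map (fun c =>
        grid.map (fun row => PySem.List.pyGetD row c 0)))
      candidates ++ [compose t v, compose t h, t, compose t (compose h v)]
    else candidates
  let st := candidates.foldl (fun (st : List (List Int) × PySem.Set (List Int)) p =>
      if PySem.Set.contains st.2 p = true then st
      else (st.1 ++ [p], PySem.Set.add st.2 p)) ([], PySem.Set.empty)
  st.1

-- ===== PRECONDITION & SPEC =====
def Spec_rectangle_spatial_permutations_py (support_shape : Int × Int) (out : List (List Int)) : Prop := out = rectangle_spatial_permutations_py_alt support_shape
instance (support_shape : Int × Int) (out : List (List Int)) : Decidable (Spec_rectangle_spatial_permutations_py support_shape out) := by unfold Spec_rectangle_spatial_permutations_py; infer_instance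

-- ===== CLAIM (what is proved, stated in full; the proofs are below) =====
def Claim_equal_rectangle_spatial_permutations_py : Prop := ∀ (support_shape : Int × Int), Dom_rectangle_spatial_permutations_py support_shape → Spec_rectangle_spatial_permutations_py support_shape (rectangle_spatial_permutations_py support_shape)

-- ===== LEMMAS AND PROOFS =====

-- the coordinate grid as a function of the two sides
def pvGrid (rows columns : Int) : List (Int × Int) :=
  (PySem.List.pyRange 0 rows 1).flatMap (fun r =>
    (PySem.List.pyRange 0 columns 1).map (fun c => (r, c)))

lemma pvGrid_succ (rows columns : Int) (h : 0 ≤ rows) :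
    pvGrid (rows + 1) columns =
      pvGrid rows columns ++ (PySem.List.pyRange 0 columns 1).map (fun c => (rows, c)) := by
  unfold pvGrid
  rw [PySem.List.pyRange_one_succ_right h, List.flatMap_append]
  simp

lemma pvGrid_mem (rows columns : Int) (x : Int × Int) :
    x ∈ pvGrid rows columns ↔ 0 ≤ x.1 ∧ x.1 < rows ∧ 0 ≤ x.2 ∧ x.2 < columns := by
  unfold pvGrid
  simp only [List.mem_flatMap, List.mem_map, PySem.List.mem_pyRange_one]
  constructor
  · rintro ⟨r, hr, c, hc, rfl⟩
    exact ⟨hr.1, hr.2, hc.1, hc.2⟩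
  · rintro ⟨h1, h2, h3, h4⟩
    exact ⟨x.1, ⟨h1, h2⟩, x.2, ⟨h3, h4⟩, rfl⟩

lemma pvGrid_length (R : Nat) (columns : Int) :
    (pvGrid (R : Int) columns).length = R * columns.toNat := by
  induction R with
  | zero => simp [pvGrid, PySem.List.pyRange_one_eq_nil (by omega : (0:Int) ≤ 0)]
  | succ n ih =>
    rw [show ((n + 1 : Nat) : Int) = (n : Int) + 1 by push_cast; ring,
      pvGrid_succ _ _ (by omega)]
    rw [List.length_append, ih, List.length_map, PySem.List.length_pyRange_one,
      sub_zero, Nat.succ_mul]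

lemma pvGrid_nodup (R : Nat) (columns : Int) : (pvGrid (R : Int) columns).Nodup := by
  induction R with
  | zero => simp [pvGrid, PySem.List.pyRange_one_eq_nil (by omega : (0:Int) ≤ 0)]
  | succ n ih =>
    rw [show ((n + 1 : Nat) : Int) = (n : Int) + 1 by push_cast; ring,
      pvGrid_succ _ _ (by omega)]
    refine List.Nodup.append ih ?_ ?_
    · refine List.Nodup.map (fun a b h => ?_) (PySem.List.nodup_pyRange_one 0 columns)
      exact congrArg Prod.snd h
    · intro x hx hx'
      obtain ⟨c, _, rfl⟩ := List.mem_map.mp hx'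
      have hm := (pvGrid_mem _ _ _).mp hx
      simp only at hm
      omega

lemma pvGrid_getElem? (R : Nat) (columns a b : Int)
    (ha0 : 0 ≤ a) (ha : a < (R : Int)) (hb0 : 0 ≤ b) (hb : b < columns) :
    (pvGrid (R : Int) columns)[(a * columns + b).toNat]? = some (a, b) := by
  induction R with
  | zero => omega
  | succ n ih =>
    have hc0 : (0 : Int) ≤ columns := by omega
    have h0 : 0 ≤ a * columns + b := by
      have := mul_nonneg ha0 hc0; omega
    rw [show ((n + 1 : Nat) : Int) = (n : Int) + 1 by push_cast; ring,
      pvGrid_succ _ _ (by omega)]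
    by_cases hcase : a < (n : Int)
    · have h1 : a * columns + b < (n : Int) * columns := by
        nlinarith [mul_le_mul_of_nonneg_right (show a + 1 ≤ (n : Int) by omega) hc0]
      have hcc : ((columns.toNat : Nat) : Int) = columns := by omega
      have hcast : ((n * columns.toNat : Nat) : Int) = (n : Int) * columns := by
        push_cast; rw [hcc]
      have hlt : (a * columns + b).toNat < (pvGrid (n : Int) columns).length := by
        rw [pvGrid_length]; omega
      rw [List.getElem?_append_left hlt]
      exact ih hcase
    · have haeq : a = (n : Int) := by omega
      have hcc : ((columns.toNat : Nat) : Int) = columns := by omega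
      have hcast : ((n * columns.toNat : Nat) : Int) = a * columns := by
        push_cast; rw [hcc, haeq]
      have hlen : (pvGrid (n : Int) columns).length = n * columns.toNat := pvGrid_length n columns
      have hidx : (a * columns + b).toNat = n * columns.toNat + b.toNat := by omega
      rw [List.getElem?_append_right (by omega), hlen, hidx,
        show n * columns.toNat + b.toNat - n * columns.toNat = b.toNat by omega,
        List.getElem?_map, PySem.List.getElem?_pyRange_one, if_pos (by omega)]
      simp only [Option.map_some]
      rw [show (0 : Int) + (b.toNat : Int) = b by omega, haeq]

-- the dict {coordinate: index} built by A, characterised on the grid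
lemma pvDict_getD (rows columns a b : Int)
    (ha0 : 0 ≤ a) (ha : a < rows) (hb0 : 0 ≤ b) (hb : b < columns) :
    ((PySem.List.enumerate (pvGrid rows columns) 0).foldl
        (fun d p => d.insert p.2 p.1) PySem.Dict.empty).getD (a, b) 0 = a * columns + b := by
  have hrows : rows = ((rows.toNat : Nat) : Int) := by omega
  have hnodup : (pvGrid rows columns).Nodup := by rw [hrows]; exact pvGrid_nodup _ _
  have hitems : ((PySem.List.enumerate (pvGrid rows columns) 0).foldl
      (fun d p => d.insert p.2 p.1) PySem.Dict.empty).items =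
      PySem.Dict.empty.items ++
        (PySem.List.enumerate (pvGrid rows columns) 0).map
          (fun (p : Int × (Int × Int)) => (p.2, p.1)) := by
    refine PySem.Dict.items_foldl_insert_fresh _
      (fun (p : Int × (Int × Int)) => p.2) (fun (p : Int × (Int × Int)) => p.1) _
      (fun p _ => PySem.Dict.contains_empty _) ?_
    rw [PySem.List.map_snd_enumerate]
    exact hnodup
  have hkeys : ((PySem.List.enumerate (pvGrid rows columns) 0).foldl
      (fun d p => d.insert p.2 p.1) PySem.Dict.empty).keys.Nodup := by
    exact PySem.Dict.nodup_keys_foldl_insert_key _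
      (fun (p : Int × (Int × Int)) => p.2) (fun _ p => p.1) _
      (by simp [PySem.Dict.keys_empty])
  have hget? : (pvGrid rows columns)[(a * columns + b).toNat]? = some (a, b) := by
    rw [hrows]; exact pvGrid_getElem? _ _ _ _ ha0 (by omega) hb0 hb
  obtain ⟨hk, hEq⟩ := List.getElem?_eq_some_iff.mp hget?
  have hmem : ((a * columns + b : Int), (a, b)) ∈
      PySem.List.enumerate (pvGrid rows columns) 0 := by
    rw [PySem.List.mem_enumerate_iff]
    refine ⟨(a * columns + b).toNat, hk, ?_⟩
    rw [hEq]
    have h0 : 0 ≤ a * columns + b := by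
      have := mul_nonneg ha0 (show (0:Int) ≤ columns by omega); omega
    rw [show (0 : Int) + ((a * columns + b).toNat : Int) = a * columns + b by omega]
  refine PySem.Dict.getD_of_mem_items _ ?_ hkeys 0
  rw [hitems]
  simp only [PySem.Dict.empty, List.nil_append, List.mem_map]
  exact ⟨_, hmem, rfl⟩

-- A's transform list, dict and the shared dedup loop, named for the proof
def pvTransforms (rows columns : Int) : List (Int → Int → Int × Int) :=
  let transforms : List (Int → Int → Int × Int) :=
    [fun row column => (row, column),
     fun row column => (rows - 1 - row, columns - 1 - column),
     fun row column => (row, columns - 1 - column),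
     fun row column => (rows - 1 - row, column)]
  if rows = columns then
      transforms ++
      [fun row column => (column, rows - 1 - row),
       fun row column => (columns - 1 - column, row),
       fun row column => (column, row),
       fun row column => (columns - 1 - column, rows - 1 - row)]
    else transforms

def pvDictOf (rows columns : Int) : PySem.Dict (Int × Int) Int :=
  (PySem.List.enumerate (pvGrid rows columns) 0).foldl
    (fun d p => d.insert p.2 p.1) PySem.Dict.empty

-- the closed-form candidate lists both sides reduce to
def pvCands (rows columns : Int) : List (List Int) :=
  let cells := pvGrid rows columns
  let candidates :=
    [cells.map (fun rc => rc.1 * columns + rc.2),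
     cells.map (fun rc => (rows - 1 - rc.1) * columns + (columns - 1 - rc.2)),
     cells.map (fun rc => rc.1 * columns + (columns - 1 - rc.2)),
     cells.map (fun rc => (rows - 1 - rc.1) * columns + rc.2)]
  if rows = columns then
      candidates ++
      [cells.map (fun rc => rc.2 * columns + (rows - 1 - rc.1)),
       cells.map (fun rc => (columns - 1 - rc.2) * columns + rc.1),
       cells.map (fun rc => rc.2 * columns + rc.1),
       cells.map (fun rc => (columns - 1 - rc.2) * columns + (rows - 1 - rc.1))]
    else candidates

lemma pvLoopAux {α : Type} (ts : List α) (F : α → List Int) (s : PySem.Set (List Int)) :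
    ts.foldl (fun (st : List (List Int) × PySem.Set (List Int)) t =>
        if PySem.Set.contains st.2 (F t) = true then st
        else (st.1 ++ [F t], PySem.Set.add st.2 (F t))) (s, s)
      = (PySem.Set.update s (ts.map F), PySem.Set.update s (ts.map F)) := by
  induction ts generalizing s with
  | nil => simp [PySem.Set.update]
  | cons p t ih =>
    rw [List.foldl_cons, List.map_cons]
    have hupd : PySem.Set.update s (F p :: t.map F)
        = PySem.Set.update (PySem.Set.add s (F p)) (t.map F) := by
      simp [PySem.Set.update]
    by_cases h : F p ∈ s
    · rw [if_pos (by simpa [PySem.Set.contains_iff] using h)]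
      rw [hupd, PySem.Set.add_of_mem h]
      exact ih s
    · rw [if_neg (by simpa [PySem.Set.contains_iff] using h)]
      rw [hupd, ← PySem.Set.add_of_not_mem h]
      exact ih (PySem.Set.add s (F p))

lemma pvLoop {α : Type} (ts : List α) (F : α → List Int) :
    (ts.foldl (fun (st : List (List Int) × PySem.Set (List Int)) t =>
        if PySem.Set.contains st.2 (F t) = true then st
        else (st.1 ++ [F t], PySem.Set.add st.2 (F t))) ([], [])).1
      = PySem.List.dedup (ts.map F) := by
  rw [pvLoopAux]
  simp [PySem.List.dedup_eq_ofList, PySem.Set.ofList_eq_foldl, PySem.Set.update]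

-- one transform's permutation: the dict lookups over the grid are the closed-form indices
lemma pvOne (rows columns : Int) (g : Int × Int → Int × Int) (f : Int × Int → Int)
    (h : ∀ rc ∈ pvGrid rows columns,
        0 ≤ (g rc).1 ∧ (g rc).1 < rows ∧ 0 ≤ (g rc).2 ∧ (g rc).2 < columns ∧
          f rc = (g rc).1 * columns + (g rc).2) :
    (pvGrid rows columns).map (fun rc => (pvDictOf rows columns).getD (g rc) 0)
      = (pvGrid rows columns).map f := by
  refine List.map_congr_left (fun rc hrc => ?_)
  obtain ⟨h1, h2, h3, h4, h5⟩ := h rc hrc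
  rw [h5]
  exact pvDict_getD rows columns _ _ h1 h2 h3 h4

lemma pvCands_eq (rows columns : Int) :
    (pvTransforms rows columns).map (fun t =>
        (pvGrid rows columns).foldl (fun acc rc =>
          acc ++ [(pvDictOf rows columns).getD (t rc.1 rc.2) 0]) [])
      = pvCands rows columns := by
  unfold pvTransforms pvCands
  have hb : ∀ rc : Int × Int, rc ∈ pvGrid rows columns →
      0 ≤ rc.1 ∧ rc.1 < rows ∧ 0 ≤ rc.2 ∧ rc.2 < columns :=
    fun rc hrc => (pvGrid_mem rows columns rc).mp hrc
  by_cases h : rows = columns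
  · simp only [if_pos h, List.map_append, List.map_cons, List.map_nil,
      PySem.List.foldl_append_singleton_eq_map, List.nil_append]
    congr 1
    · simp only [List.cons.injEq, and_true]
      refine ⟨?_, ?_, ?_, ?_⟩
      · exact pvOne rows columns (fun rc => (rc.1, rc.2)) _
          (fun rc hrc => by have := hb rc hrc; dsimp only; exact ⟨by omega, by omega, by omega, by omega, rfl⟩)
      · exact pvOne rows columns (fun rc => (rows - 1 - rc.1, columns - 1 - rc.2)) _
          (fun rc hrc => by have := hb rc hrc; dsimp only; exact ⟨by omega, by omega, by omega, by omega, rfl⟩)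
      · exact pvOne rows columns (fun rc => (rc.1, columns - 1 - rc.2)) _
          (fun rc hrc => by have := hb rc hrc; dsimp only; exact ⟨by omega, by omega, by omega, by omega, rfl⟩)
      · exact pvOne rows columns (fun rc => (rows - 1 - rc.1, rc.2)) _
          (fun rc hrc => by have := hb rc hrc; dsimp only; exact ⟨by omega, by omega, by omega, by omega, rfl⟩)
    · simp only [List.cons.injEq, and_true]
      refine ⟨?_, ?_, ?_, ?_⟩
      · exact pvOne rows columns (fun rc => (rc.2, rows - 1 - rc.1)) _
          (fun rc hrc => by have := hb rc hrc; dsimp only; exact ⟨by omega, by omega, by omega, by omega, rfl⟩)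
      · exact pvOne rows columns (fun rc => (columns - 1 - rc.2, rc.1)) _
          (fun rc hrc => by have := hb rc hrc; dsimp only; exact ⟨by omega, by omega, by omega, by omega, rfl⟩)
      · exact pvOne rows columns (fun rc => (rc.2, rc.1)) _
          (fun rc hrc => by have := hb rc hrc; dsimp only; exact ⟨by omega, by omega, by omega, by omega, rfl⟩)
      · exact pvOne rows columns (fun rc => (columns - 1 - rc.2, rows - 1 - rc.1)) _
          (fun rc hrc => by have := hb rc hrc; dsimp only; exact ⟨by omega, by omega, by omega, by omega, rfl⟩)
  · simp only [if_neg h, List.map_cons, List.map_nil,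
      PySem.List.foldl_append_singleton_eq_map, List.nil_append]
    simp only [List.cons.injEq, and_true]
    refine ⟨?_, ?_, ?_, ?_⟩
    · exact pvOne rows columns (fun rc => (rc.1, rc.2)) _
        (fun rc hrc => by have := hb rc hrc; dsimp only; exact ⟨by omega, by omega, by omega, by omega, rfl⟩)
    · exact pvOne rows columns (fun rc => (rows - 1 - rc.1, columns - 1 - rc.2)) _
        (fun rc hrc => by have := hb rc hrc; dsimp only; exact ⟨by omega, by omega, by omega, by omega, rfl⟩)
    · exact pvOne rows columns (fun rc => (rc.1, columns - 1 - rc.2)) _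
        (fun rc hrc => by have := hb rc hrc; dsimp only; exact ⟨by omega, by omega, by omega, by omega, rfl⟩)
    · exact pvOne rows columns (fun rc => (rows - 1 - rc.1, rc.2)) _
        (fun rc hrc => by have := hb rc hrc; dsimp only; exact ⟨by omega, by omega, by omega, by omega, rfl⟩)


-- ---- B-side: the generator/composition candidates reduce to the same closed forms ----

lemma pvRange_shift (a n : Int) :
    PySem.List.pyRange a (a + n) 1 = (PySem.List.pyRange 0 n 1).map (fun k => a + k) := by
  rw [PySem.List.pyRange_one, PySem.List.pyRange_one, List.map_map]
  simp [Function.comp_def]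

lemma pvRange_reverse (n : Int) :
    (PySem.List.pyRange 0 n 1).reverse = (PySem.List.pyRange 0 n 1).map (fun k => n - 1 - k) := by
  apply List.ext_getElem
  · simp
  · intro i h1 h2
    rw [List.getElem_reverse, List.getElem_map,
      PySem.List.getElem_pyRange_one, PySem.List.getElem_pyRange_one]
    have hl : (PySem.List.pyRange 0 n 1).length = (n - 0).toNat := PySem.List.length_pyRange_one 0 n
    have hi : i < (n - 0).toNat := by
      have := h1; rw [List.length_reverse, hl] at this; exact this
    rw [hl]
    omega

-- the port's row r of the grid, as a map over range(columns)
lemma pvRow_eq (columns r : Int) :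
    PySem.List.pyRange (r * columns) ((r + 1) * columns) 1
      = (PySem.List.pyRange 0 columns 1).map (fun c => r * columns + c) := by
  rw [show (r + 1) * columns = r * columns + columns by ring, pvRange_shift]

-- indexing the closed-form permutation list at a grid index
lemma pvLookup (rows columns a b : Int) (f : Int × Int → Int)
    (ha0 : 0 ≤ a) (ha : a < rows) (hb0 : 0 ≤ b) (hb : b < columns) :
    PySem.List.pyGetD ((pvGrid rows columns).map f) (a * columns + b) 0 = f (a, b) := by
  have hrows : rows = ((rows.toNat : Nat) : Int) := by omega
  have hget? : (pvGrid rows columns)[(a * columns + b).toNat]? = some (a, b) := by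
    rw [hrows]; exact pvGrid_getElem? _ _ _ _ ha0 (by omega) hb0 hb
  have h0 : 0 ≤ a * columns + b := by
    have := mul_nonneg ha0 (show (0:Int) ≤ columns by omega); omega
  rw [PySem.List.pyGetD_of_nonneg _ _ h0, List.getD_eq_getElem?_getD, List.getElem?_map, hget?]
  rfl

-- composing two closed-form index permutations (p[q[i]]) is the composed coordinate map
lemma pvCompose (rows columns : Int) (gp gq : Int × Int → Int × Int)
    (hq : ∀ rc ∈ pvGrid rows columns,
      0 ≤ (gq rc).1 ∧ (gq rc).1 < rows ∧ 0 ≤ (gq rc).2 ∧ (gq rc).2 < columns) :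
    ((pvGrid rows columns).map (fun rc => (gq rc).1 * columns + (gq rc).2)).map
      (fun j => PySem.List.pyGetD
        ((pvGrid rows columns).map (fun rc => (gp rc).1 * columns + (gp rc).2)) j 0)
    = (pvGrid rows columns).map (fun rc => (gp (gq rc)).1 * columns + (gp (gq rc)).2) := by
  rw [List.map_map]
  refine List.map_congr_left (fun rc hrc => ?_)
  obtain ⟨h1, h2, h3, h4⟩ := hq rc hrc
  simpa using pvLookup rows columns _ _
    (fun rc => (gp rc).1 * columns + (gp rc).2) h1 h2 h3 h4

-- the port's grid, flattened in the three generator forms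
lemma pvIdent_eq (rows columns : Int) :
    ((PySem.List.pyRange 0 rows 1).map (fun r =>
        PySem.List.pyRange (r * columns) ((r + 1) * columns) 1)).flatMap (fun row => row)
      = (pvGrid rows columns).map (fun rc => rc.1 * columns + rc.2) := by
  unfold pvGrid
  rw [List.map_flatMap, List.flatMap_map]
  congr 1
  funext r
  rw [pvRow_eq, List.map_map]
  rfl

lemma pvH_eq (rows columns : Int) :
    (((PySem.List.pyRange 0 rows 1).map (fun r =>
        PySem.List.pyRange (r * columns) ((r + 1) * columns) 1)).map
          (fun row => row.reverse)).flatMap (fun row => row)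
      = (pvGrid rows columns).map (fun rc => rc.1 * columns + (columns - 1 - rc.2)) := by
  unfold pvGrid
  rw [List.map_flatMap, List.map_map, List.flatMap_map]
  congr 1
  funext r
  rw [Function.comp_apply, pvRow_eq, ← List.map_reverse, pvRange_reverse,
    List.map_map, List.map_map]
  rfl

lemma pvV_eq (rows columns : Int) :
    (((PySem.List.pyRange 0 rows 1).map (fun r =>
        PySem.List.pyRange (r * columns) ((r + 1) * columns) 1)).reverse).flatMap (fun row => row)
      = (pvGrid rows columns).map (fun rc => (rows - 1 - rc.1) * columns + rc.2) := by
  unfold pvGrid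
  rw [List.map_flatMap, ← List.map_reverse, pvRange_reverse, List.map_map,
    List.flatMap_map]
  congr 1
  funext r
  rw [Function.comp_apply, pvRow_eq]
  simp [Function.comp_def]

-- the transpose candidate (square case)
lemma pvT_eq (n : Int) :
    ((PySem.List.pyRange 0 n 1).map (fun c =>
        ((PySem.List.pyRange 0 n 1).map (fun r =>
          PySem.List.pyRange (r * n) ((r + 1) * n) 1)).map
            (fun row => PySem.List.pyGetD row c 0))).flatMap (fun row => row)
      = (pvGrid n n).map (fun rc => rc.2 * n + rc.1) := by
  unfold pvGrid
  rw [List.map_flatMap, List.flatMap_map]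
  rw [List.flatMap_def, List.flatMap_def]
  congr 1
  refine List.map_congr_left (fun c hc => ?_)
  obtain ⟨hc0, hcn⟩ := PySem.List.mem_pyRange_one.mp hc
  rw [List.map_map, List.map_map]
  refine List.map_congr_left (fun r _ => ?_)
  simp only [Function.comp_apply]
  rw [pvRow_eq]
  exact PySem.List.pyGetD_map_pyRange_of_nonneg _ n c 0 hc0 hcn

-- B's candidate list, named for the proof (same let-structure as the port)
def pvAltCands (rows columns : Int) : List (List Int) :=
  let grid : List (List Int) :=
    (PySem.List.pyRange 0 rows 1).map (fun r =>
      PySem.List.pyRange (r * columns) ((r + 1) * columns) 1)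
  let flat : List (List Int) → List Int := fun g => g.flatMap (fun row => row)
  let compose : List Int → List Int → List Int := fun p q =>
    q.map (fun j => PySem.List.pyGetD p j 0)
  let ident := flat grid
  let h := flat (grid.map (fun row => row.reverse))
  let v := flat grid.reverse
  let candidates := [ident, compose h v, h, v]
  if rows = columns then
    let t := flat ((PySem.List.pyRange 0 columns 1).map (fun c =>
      grid.map (fun row => PySem.List.pyGetD row c 0)))
    candidates ++ [compose t v, compose t h, t, compose t (compose h v)]
  else candidates

lemma pvAltCands_eq (rows columns : Int) :
    pvAltCands rows columns = pvCands rows columns := by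
  unfold pvAltCands pvCands
  have hbnd : ∀ rc : Int × Int, rc ∈ pvGrid rows columns →
      0 ≤ rc.1 ∧ rc.1 < rows ∧ 0 ≤ rc.2 ∧ rc.2 < columns :=
    fun rc hrc => (pvGrid_mem rows columns rc).mp hrc
  have hI := pvIdent_eq rows columns
  have hH := pvH_eq rows columns
  have hV := pvV_eq rows columns
  have hHV : ((pvGrid rows columns).map (fun rc => (rows - 1 - rc.1) * columns + rc.2)).map
      (fun j => PySem.List.pyGetD
        ((pvGrid rows columns).map (fun rc => rc.1 * columns + (columns - 1 - rc.2))) j 0)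
      = (pvGrid rows columns).map
          (fun rc => (rows - 1 - rc.1) * columns + (columns - 1 - rc.2)) :=
    pvCompose rows columns (fun rc => (rc.1, columns - 1 - rc.2))
      (fun rc => (rows - 1 - rc.1, rc.2))
      (fun rc hrc => by have := hbnd rc hrc; dsimp only; exact ⟨by omega, by omega, by omega, by omega⟩)
  by_cases hsq : rows = columns
  · subst hsq
    simp only []
    have hT := pvT_eq rows
    have hTV : ((pvGrid rows rows).map (fun rc => (rows - 1 - rc.1) * rows + rc.2)).map
        (fun j => PySem.List.pyGetD ((pvGrid rows rows).map (fun rc => rc.2 * rows + rc.1)) j 0)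
        = (pvGrid rows rows).map (fun rc => rc.2 * rows + (rows - 1 - rc.1)) :=
      pvCompose rows rows (fun rc => (rc.2, rc.1)) (fun rc => (rows - 1 - rc.1, rc.2))
        (fun rc hrc => by have := hbnd rc hrc; dsimp only; exact ⟨by omega, by omega, by omega, by omega⟩)
    have hTH : ((pvGrid rows rows).map (fun rc => rc.1 * rows + (rows - 1 - rc.2))).map
        (fun j => PySem.List.pyGetD ((pvGrid rows rows).map (fun rc => rc.2 * rows + rc.1)) j 0)
        = (pvGrid rows rows).map (fun rc => (rows - 1 - rc.2) * rows + rc.1) :=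
      pvCompose rows rows (fun rc => (rc.2, rc.1)) (fun rc => (rc.1, rows - 1 - rc.2))
        (fun rc hrc => by have := hbnd rc hrc; dsimp only; exact ⟨by omega, by omega, by omega, by omega⟩)
    have hTHV : ((pvGrid rows rows).map
          (fun rc => (rows - 1 - rc.1) * rows + (rows - 1 - rc.2))).map
        (fun j => PySem.List.pyGetD ((pvGrid rows rows).map (fun rc => rc.2 * rows + rc.1)) j 0)
        = (pvGrid rows rows).map (fun rc => (rows - 1 - rc.2) * rows + (rows - 1 - rc.1)) :=
      pvCompose rows rows (fun rc => (rc.2, rc.1))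
        (fun rc => (rows - 1 - rc.1, rows - 1 - rc.2))
        (fun rc hrc => by have := hbnd rc hrc; dsimp only; exact ⟨by omega, by omega, by omega, by omega⟩)
    rw [hI, hH, hV, hHV, hT, hTV, hTH, hTHV]
  · simp only [if_neg hsq]
    rw [hI, hH, hV, hHV]

-- ===== VERDICT (by name: the statement is the Claim_ definition above) =====
theorem rectangle_spatial_permutations_py_spec : Claim_equal_rectangle_spatial_permutations_py := by
  intro ss _
  obtain ⟨rows, columns⟩ := ss
  unfold Spec_rectangle_spatial_permutations_py
  have hA : rectangle_spatial_permutations_py (rows, columns)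
      = PySem.List.dedup ((pvTransforms rows columns).map (fun t =>
          (pvGrid rows columns).foldl (fun acc rc =>
            acc ++ [(pvDictOf rows columns).getD (t rc.1 rc.2) 0]) [])) :=
    pvLoop (pvTransforms rows columns) _
  have hB : rectangle_spatial_permutations_py_alt (rows, columns)
      = PySem.List.dedup ((pvAltCands rows columns).map (fun p => p)) :=
    pvLoop (pvAltCands rows columns) (fun p => p)
  rw [hA, hB, List.map_id', pvAltCands_eq, pvCands_eq]
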